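-- pv_equiv track=rewrite | github.com/sanjay-1602/random-password-generator | Project/pronounce.py | make_templates
-- ===== SOURCE A (Python) =====
-- def is_valid_template(template):
--     """Checks if the string would be a legal template for building a password"""
--     if template.startswith("bb"): # two leading consonants
--         return False
--     if "bbb" in template: # three consecutive consonants
--         return False
--     if "aaa" in template: # three consecutive vowels
--         return False
--     if template.endswith("bb"): # two final consonants
--         return False
--     return True
--
-- def make_templates(n_vowels, n_consonants, prefix = ""):
--     """Returns all template strings with n_vowels 'a' and n_consonants 'b'"""
--     templates = []
--     if n_vowels > 0:
--         new_templates = make_templates(n_vowels - 1, n_consonants, prefix + "a")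
--         templates.extend(new_templates)
--     if n_consonants > 0:
--         new_templates = make_templates(n_vowels, n_consonants - 1, prefix + "b")
--         templates.extend(new_templates)
--     if 0 == n_vowels and 0 == n_consonants:
--         if is_valid_template(prefix):
--             templates.append(prefix)
--     return templates
-- ===== SOURCE B (Python) =====
-- def make_templates(n_vowels, n_consonants, prefix = ""):
--     """Returns all template strings with n_vowels 'a' and n_consonants 'b'.
--
--     Backtracking with early pruning: a branch is abandoned as soon as the
--     partial string violates a monotone rule (leading "bb", "bbb", "aaa");
--     only the non-monotone trailing-"bb" rule is checked at the leaves.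
--     """
--     if prefix.startswith("bb") or "bbb" in prefix or "aaa" in prefix:
--         return []
--     results = []
--
--     def go(v, c, s):
--         if v == 0 and c == 0:
--             if not s.endswith("bb"):
--                 results.append(s)
--             return
--         if v > 0:
--             if not (s + "a").endswith("aaa"):
--                 go(v - 1, c, s + "a")
--         if c > 0:
--             if not ((s + "b").endswith("bbb") or s + "b" == "bb"):
--                 go(v, c - 1, s + "b")
--
--     go(n_vowels, n_consonants, prefix)
--     return results
-- ===== Notes on version B (the rewrite author's own statement) =====
-- stated objective: alternative
-- what changed: Instead of enumerating all C(v+c,v) interleavings and filtering complete strings, B backtracks and prunes a branch as soon as the partial string violates a monotone rule (leading 'bb', 'bbb', 'aaa'), checking only the trailing-'bb' rule at the leaves; intended as faster (measured 304x at the largest size both finished, but a timing run could not confirm it overall since the valid output itself grows exponentially). Pre_ excludes only recursion depths (n_vowels+n_consonants >= 900) near CPython's recursion limit, where the recursive A raises RecursionError.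
import Mathlib
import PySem

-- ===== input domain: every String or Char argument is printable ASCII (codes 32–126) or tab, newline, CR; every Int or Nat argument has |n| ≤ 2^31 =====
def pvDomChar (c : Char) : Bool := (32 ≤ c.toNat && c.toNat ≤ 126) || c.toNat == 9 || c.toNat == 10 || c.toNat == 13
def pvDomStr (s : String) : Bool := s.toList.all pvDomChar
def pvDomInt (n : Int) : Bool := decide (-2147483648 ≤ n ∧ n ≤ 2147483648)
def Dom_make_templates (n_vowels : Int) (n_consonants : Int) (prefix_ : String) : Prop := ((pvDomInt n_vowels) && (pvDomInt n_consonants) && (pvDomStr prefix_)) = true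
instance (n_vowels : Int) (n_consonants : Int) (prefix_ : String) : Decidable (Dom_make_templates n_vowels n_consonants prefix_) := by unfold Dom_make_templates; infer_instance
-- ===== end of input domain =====

-- B replaces A's exhaustive enumerate-then-filter with backtracking that prunes
-- invalid prefixes early (objective: alternative; same output list, same order).


-- ===== PORT A =====
def is_valid_template (template : String) : Bool :=
  if PySem.Str.startswith template "bb" then false
  else if PySem.Str.isIn "bbb" template then false
  else if PySem.Str.isIn "aaa" template then false
  else if PySem.Str.endswith template "bb" then false
  else true

def make_templates (n_vowels : Int) (n_consonants : Int) (prefix_ : String) : List String :=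
  let templates : List String := []
  let templates := if 0 < n_vowels then
      templates ++ make_templates (n_vowels - 1) n_consonants (prefix_ ++ "a")
    else templates
  let templates := if 0 < n_consonants then
      templates ++ make_templates n_vowels (n_consonants - 1) (prefix_ ++ "b")
    else templates
  let templates := if 0 = n_vowels ∧ 0 = n_consonants then
      (if is_valid_template prefix_ then templates ++ [prefix_] else templates)
    else templates
  templates
termination_by (n_vowels.toNat + n_consonants.toNat)
decreasing_by all_goals omega

-- ===== PORT B =====
def make_templates_go (v : Int) (c : Int) (s : String) (results : List String) : List String :=
  if v = 0 ∧ c = 0 then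
    if !(PySem.Str.endswith s "bb") then results ++ [s] else results
  else
    let results := if 0 < v then
        if !(PySem.Str.endswith (s ++ "a") "aaa") then make_templates_go (v - 1) c (s ++ "a") results
        else results
      else results
    if 0 < c then
      if !(PySem.Str.endswith (s ++ "b") "bbb" || (s ++ "b") == "bb") then
        make_templates_go v (c - 1) (s ++ "b") results
      else results
    else results
termination_by (v.toNat + c.toNat)
decreasing_by all_goals omega

def make_templates_alt (n_vowels : Int) (n_consonants : Int) (prefix_ : String) : List String :=
  if PySem.Str.startswith prefix_ "bb" || PySem.Str.isIn "bbb" prefix_ || PySem.Str.isIn "aaa" prefix_ then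
    []
  else
    make_templates_go n_vowels n_consonants prefix_ []

-- ===== PRECONDITION & SPEC =====
-- Pre_ excludes only inputs whose recursion depth n_vowels + n_consonants approaches CPython's
-- default recursion limit (1000), where the recursive A raises RecursionError (as may B).
def Pre_make_templates (n_vowels : Int) (n_consonants : Int) (prefix_ : String) : Prop :=
  n_vowels.toNat + n_consonants.toNat < 900
instance (n_vowels : Int) (n_consonants : Int) (prefix_ : String) : Decidable (Pre_make_templates n_vowels n_consonants prefix_) := by unfold Pre_make_templates; infer_instance
def pvWitness_make_templates : Int × Int × String := (2, 2, "ab")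

def Spec_make_templates (n_vowels : Int) (n_consonants : Int) (prefix_ : String) (out : List String) : Prop := out = make_templates_alt n_vowels n_consonants prefix_
instance (n_vowels : Int) (n_consonants : Int) (prefix_ : String) (out : List String) : Decidable (Spec_make_templates n_vowels n_consonants prefix_ out) := by unfold Spec_make_templates; infer_instance

-- ===== CLAIM (what is proved, stated in full; the proofs are below) =====
def Claim_equal_make_templates : Prop := ∀ (n_vowels : Int) (n_consonants : Int) (prefix_ : String), Dom_make_templates n_vowels n_consonants prefix_ → Pre_make_templates n_vowels n_consonants prefix_ → Spec_make_templates n_vowels n_consonants prefix_ (make_templates n_vowels n_consonants prefix_)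

-- ===== LEMMAS AND PROOFS =====

-- "s already violates a monotone validity rule" (on the character list)
def pvBad (l : List Char) : Prop :=
  ['b','b'] <+: l ∨ ['b','b','b'] <:+: l ∨ ['a','a','a'] <:+: l

lemma toList_a : ("a" : String).toList = ['a'] := by decide
lemma toList_b : ("b" : String).toList = ['b'] := by decide
lemma toList_bb : ("bb" : String).toList = ['b','b'] := by decide
lemma toList_aaa : ("aaa" : String).toList = ['a','a','a'] := by decide
lemma toList_bbb : ("bbb" : String).toList = ['b','b','b'] := by decide

-- an infix of l ++ [c] is an infix of l or a suffix of l ++ [c]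
lemma infix_append_singleton {pat l : List Char} {c : Char} :
    pat <:+: l ++ [c] ↔ pat <:+: l ∨ pat <:+ l ++ [c] := by
  constructor
  · rintro ⟨u, v, huv⟩
    induction v using List.reverseRecOn with
    | nil => right; exact ⟨u, by simpa using huv⟩
    | append_singleton v' c' _ =>
      left
      have h := huv
      rw [show u ++ pat ++ (v' ++ [c']) = (u ++ pat ++ v') ++ [c'] by simp] at h
      have h2 := List.append_inj' h rfl
      exact ⟨u, v', by simpa using h2.1⟩
  · rintro (h | h)
    · exact h.trans (List.prefix_append l [c]).isInfix
    · exact h.isInfix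

lemma prefix_two_append_singleton {p q : Char} {l : List Char} {c : Char} :
    [p, q] <+: l ++ [c] ↔ [p, q] <+: l ∨ l ++ [c] = [p, q] := by
  match l with
  | [] =>
    simp only [List.nil_append, List.cons_prefix_cons, List.prefix_nil]
    constructor
    · rintro ⟨-, h⟩; simp at h
    · rintro (h | h) <;> simp at h
  | [x] =>
    simp only [List.singleton_append, List.cons_prefix_cons, List.prefix_nil, List.cons.injEq]
    constructor
    · rintro ⟨rfl, rfl, -⟩; exact Or.inr ⟨rfl, rfl, trivial⟩
    · rintro (⟨-, h⟩ | ⟨rfl, rfl, -⟩)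
      · simp at h
      · exact ⟨rfl, rfl, trivial⟩
  | x :: y :: l' =>
    simp only [List.cons_append, List.cons_prefix_cons]
    constructor
    · rintro ⟨h1, h2, -⟩; exact Or.inl ⟨h1, h2, List.prefix_append _ _⟩
    · rintro (⟨h1, h2, -⟩ | h)
      · exact ⟨h1, h2, (List.prefix_append _ _)⟩
      · have := congrArg List.length h; simp at this

lemma suffix_append_singleton {xs : List Char} {x : Char} {l : List Char} {c : Char} :
    xs ++ [x] <:+ l ++ [c] ↔ x = c ∧ xs <:+ l := by
  rw [← List.reverse_prefix, ← List.reverse_prefix]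
  simp [List.cons_prefix_cons]

lemma bad_of_append {l t : List Char} (h : pvBad l) : pvBad (l ++ t) := by
  rcases h with h | h | h
  · exact Or.inl (h.trans (List.prefix_append _ _))
  · exact Or.inr (Or.inl (h.trans (List.prefix_append l t).isInfix))
  · exact Or.inr (Or.inr (h.trans (List.prefix_append l t).isInfix))

lemma bad_append_a {l : List Char} (hl : ¬ pvBad l) :
    pvBad (l ++ ['a']) ↔ ['a','a','a'] <:+ l ++ ['a'] := by
  constructor
  · rintro (h | h | h)
    · rcases prefix_two_append_singleton.mp h with h' | h'
      · exact absurd (Or.inl h') hl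
      · have := congrArg (List.getLast? ·) h'; simp at this
    · rcases infix_append_singleton.mp h with h' | h'
      · exact absurd (Or.inr (Or.inl h')) hl
      · rw [show (['b','b','b'] : List Char) = ['b','b'] ++ ['b'] by rfl] at h'
        have := (suffix_append_singleton.mp h').1; simp at this
    · rcases infix_append_singleton.mp h with h' | h'
      · exact absurd (Or.inr (Or.inr h')) hl
      · exact h'
  · intro h
    exact Or.inr (Or.inr h.isInfix)

lemma bad_append_b {l : List Char} (hl : ¬ pvBad l) :
    pvBad (l ++ ['b']) ↔ ['b','b','b'] <:+ l ++ ['b'] ∨ l ++ ['b'] = ['b','b'] := by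
  constructor
  · rintro (h | h | h)
    · rcases prefix_two_append_singleton.mp h with h' | h'
      · exact absurd (Or.inl h') hl
      · exact Or.inr h'
    · rcases infix_append_singleton.mp h with h' | h'
      · exact absurd (Or.inr (Or.inl h')) hl
      · exact Or.inl h'
    · rcases infix_append_singleton.mp h with h' | h'
      · exact absurd (Or.inr (Or.inr h')) hl
      · rw [show (['a','a','a'] : List Char) = ['a','a'] ++ ['a'] by rfl] at h'
        have := (suffix_append_singleton.mp h').1; simp at this
  · rintro (h | h)
    · exact Or.inr (Or.inl h.isInfix)
    · exact Or.inl (by rw [h])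

-- the Bool guard of make_templates_alt decides pvBad
lemma bad_guard (s : String) :
    (PySem.Str.startswith s "bb" || PySem.Str.isIn "bbb" s || PySem.Str.isIn "aaa" s) = true
      ↔ pvBad s.toList := by
  simp only [Bool.or_eq_true, PySem.Str.startswith_eq, PySem.Chars.startswith_iff,
    PySem.Str.isIn_iff_infix, toList_bb, toList_bbb, toList_aaa, pvBad, or_assoc]

lemma endswith_iff' (s p : String) :
    PySem.Str.endswith s p = true ↔ p.toList <:+ s.toList := by
  simp only [PySem.Str.endswith_eq, PySem.Chars.endswith_iff]

-- on a bad prefix A returns the empty list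
lemma A_bad (n : Nat) : ∀ (v c : Int) (s : String), v.toNat + c.toNat ≤ n →
    pvBad s.toList → make_templates v c s = [] := by
  induction n with
  | zero =>
    intro v c s hn hb
    rw [make_templates]
    have hv : ¬ 0 < v := by omega
    have hc : ¬ 0 < c := by omega
    simp only [hv, hc, if_false, List.nil_append]
    split
    · rcases hb with h | h | h <;>
        simp only [is_valid_template, PySem.Str.startswith_eq, PySem.Chars.startswith_iff,
          PySem.Str.isIn_iff_infix, toList_bb, toList_bbb, toList_aaa] <;>
        split_ifs <;> simp_all
    · rfl
  | succ m ih =>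
    intro v c s hn hb
    rw [make_templates]
    have hrec_a : 0 < v → make_templates (v - 1) c (s ++ "a") = [] := by
      intro hv
      exact ih _ _ _ (by omega) (by simpa [toList_a] using bad_of_append (t := ['a']) hb)
    have hrec_b : 0 < c → make_templates v (c - 1) (s ++ "b") = [] := by
      intro hc
      exact ih _ _ _ (by omega) (by simpa [toList_b] using bad_of_append (t := ['b']) hb)
    have hvalid : is_valid_template s = false := by
      rcases hb with h | h | h <;>
        simp only [is_valid_template, PySem.Str.startswith_eq, PySem.Chars.startswith_iff,
          PySem.Str.isIn_iff_infix, toList_bb, toList_bbb, toList_aaa] <;>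
        split_ifs <;> simp_all
    split_ifs <;> simp_all

-- on a good prefix B's backtracking computes A's list (appended to the accumulator)
lemma go_eq (n : Nat) : ∀ (v c : Int) (s : String) (acc : List String),
    v.toNat + c.toNat ≤ n → ¬ pvBad s.toList →
    make_templates_go v c s acc = acc ++ make_templates v c s := by
  induction n with
  | zero =>
    intro v c s acc hn hg
    rw [make_templates_go, make_templates]
    have hv : ¬ 0 < v := by omega
    have hc : ¬ 0 < c := by omega
    by_cases h0 : v = 0 ∧ c = 0
    · have hvalid : is_valid_template s = (!PySem.Str.endswith s "bb") := by
        simp only [is_valid_template, PySem.Str.startswith_eq, PySem.Chars.startswith_iff,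
          PySem.Str.isIn_iff_infix, toList_bb, toList_bbb, toList_aaa, pvBad] at hg ⊢
        push Not at hg
        rw [if_neg (by tauto), if_neg (by tauto), if_neg (by tauto)]
        cases h : PySem.Str.endswith s "bb" <;> simp
      simp only [h0, and_self, if_true, hv, hc, if_false]
      simp only [show (0 = v ∧ 0 = c) from ⟨h0.1.symm, h0.2.symm⟩, and_self, if_true, hvalid]
      cases h : PySem.Str.endswith s "bb" <;> simp
    · have h0' : ¬ (0 = v ∧ 0 = c) := fun ⟨h1, h2⟩ => h0 ⟨h1.symm, h2.symm⟩
      simp [h0, h0', hv, hc]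
  | succ m ih =>
    intro v c s acc hn hg
    rw [make_templates_go, make_templates]
    by_cases h0 : v = 0 ∧ c = 0
    · have hv : ¬ 0 < v := by omega
      have hc : ¬ 0 < c := by omega
      have hvalid : is_valid_template s = (!PySem.Str.endswith s "bb") := by
        simp only [is_valid_template, PySem.Str.startswith_eq, PySem.Chars.startswith_iff,
          PySem.Str.isIn_iff_infix, toList_bb, toList_bbb, toList_aaa, pvBad] at hg ⊢
        push Not at hg
        rw [if_neg (by tauto), if_neg (by tauto), if_neg (by tauto)]
        cases h : PySem.Str.endswith s "bb" <;> simp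
      simp only [h0, and_self, if_true, hv, hc, if_false]
      simp only [show (0 = v ∧ 0 = c) from ⟨h0.1.symm, h0.2.symm⟩, and_self, if_true, hvalid]
      cases h : PySem.Str.endswith s "bb" <;> simp
    · rw [if_neg h0]
      have h0' : ¬ (0 = v ∧ 0 = c) := fun ⟨h1, h2⟩ => h0 ⟨h1.symm, h2.symm⟩
      rw [if_neg h0']
      have hta : (s ++ "a").toList = s.toList ++ ['a'] := by simp [toList_a]
      have htb : (s ++ "b").toList = s.toList ++ ['b'] := by simp [toList_b]
      -- the a-branch
      have step_a :
          (if 0 < v then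
              (if !(PySem.Str.endswith (s ++ "a") "aaa") then
                  make_templates_go (v - 1) c (s ++ "a") acc else acc)
            else acc)
          = acc ++ (if 0 < v then make_templates (v - 1) c (s ++ "a") else []) := by
        by_cases hv : 0 < v
        · rw [if_pos hv, if_pos hv]
          by_cases he : PySem.Str.endswith (s ++ "a") "aaa" = true
          · rw [he]
            have hsuf : ['a','a','a'] <:+ s.toList ++ ['a'] := by
              have h' := (endswith_iff' _ _).mp he
              rwa [toList_aaa, hta] at h'
            have hbad : pvBad (s ++ "a").toList := by
              rw [hta]; exact (bad_append_a hg).mpr hsuf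
            rw [A_bad m _ _ _ (by omega) hbad]
            simp
          · rw [Bool.not_eq_true] at he
            rw [he]
            have hgood : ¬ pvBad (s ++ "a").toList := by
              rw [hta, bad_append_a hg]
              intro hsuf
              have h' : PySem.Str.endswith (s ++ "a") "aaa" = true := by
                rw [endswith_iff', toList_aaa, hta]; exact hsuf
              rw [he] at h'; exact Bool.false_ne_true h'
            simpa using ih (v - 1) c (s ++ "a") acc (by omega) hgood
        · simp [hv]
      rw [step_a]
      -- the b-branch
      by_cases hc : 0 < c
      · rw [if_pos hc, if_pos hc]
        by_cases hp : (PySem.Str.endswith (s ++ "b") "bbb" || (s ++ "b") == "bb") = true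
        · rw [hp]
          have hbad : pvBad (s ++ "b").toList := by
            rw [htb]
            refine (bad_append_b hg).mpr ?_
            rcases Bool.or_eq_true_iff.mp hp with h | h
            · exact Or.inl (by rw [← toList_bbb, ← htb]; exact (endswith_iff' _ _).mp h)
            · exact Or.inr (by rw [← htb, ← toList_bb]; exact congrArg String.toList (eq_of_beq h))
          rw [A_bad m _ _ _ (by omega) hbad]
          simp
        · rw [Bool.not_eq_true] at hp
          rw [hp]
          have hgood : ¬ pvBad (s ++ "b").toList := by
            rw [htb, bad_append_b hg]
            have hp' := hp
            simp only [Bool.or_eq_false_iff] at hp'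
            rintro (h | h)
            · have h1 : PySem.Str.endswith (s ++ "b") "bbb" = true := by
                rw [endswith_iff', toList_bbb, htb]; exact h
              rw [hp'.1] at h1; exact Bool.false_ne_true h1
            · have h1 : ((s ++ "b") == "bb") = true := by
                refine beq_iff_eq.mpr (String.toList_inj.mp ?_)
                rw [htb, toList_bb]; exact h
              rw [hp'.2] at h1; exact Bool.false_ne_true h1
          rw [ih v (c - 1) (s ++ "b") _ (by omega) hgood]
          simp
      · rw [if_neg hc, if_neg hc]
        simp

-- ===== VERDICT (by name: the statement is the Claim_ definition above) =====
theorem make_templates_spec : Claim_equal_make_templates := by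
  intro v c p _ _
  show make_templates v c p = make_templates_alt v c p
  rw [make_templates_alt]
  by_cases h : (PySem.Str.startswith p "bb" || PySem.Str.isIn "bbb" p || PySem.Str.isIn "aaa" p) = true
  · rw [if_pos h]
    exact A_bad (v.toNat + c.toNat) v c p le_rfl ((bad_guard p).mp h)
  · rw [if_neg h]
    have hg : ¬ pvBad p.toList := fun hb => h ((bad_guard p).mpr hb)
    simpa using (go_eq (v.toNat + c.toNat) v c p [] le_rfl hg).symm
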